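-- pv_equiv track=rewrite | github.com/cctulig/gomoku_ai | board.py | trim_pattern
-- ===== SOURCE A (Python) =====
-- def trim_pattern(pattern: list, player):
--     length = len(pattern)
--     for i in range(0, length):
--         done = True
--         if len(pattern) >= 2 and pattern[1] != player:
--             pattern.pop(0)
--             done = False
--         if len(pattern) >= 2 and pattern[-2] != player:
--             pattern.pop(-1)
--             done = False
--         if done:
--             return pattern
-- ===== SOURCE B (Python) =====
-- def trim_pattern(pattern: list, player):
--     # Two-pointer trimming: maintain a window [lo, hi) instead of popping
--     # from the list (A's pop(0) is O(n)); same alternating end checks.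
--     # Note: unlike A, this does not mutate `pattern` in place.
--     lo, hi = 0, len(pattern)
--     while True:
--         moved = False
--         if lo + 2 <= hi and pattern[lo + 1] != player:
--             lo += 1
--             moved = True
--         if lo + 2 <= hi and pattern[hi - 2] != player:
--             hi -= 1
--             moved = True
--         if not moved:
--             return pattern[lo:hi]
-- ===== Notes on version B (the rewrite author's own statement) =====
-- stated objective: faster
-- what changed: B trims with two index pointers over the unchanged list and returns one final slice, instead of A's fuel-bounded for-loop that repeatedly pops from both ends of the list (pop(0) is linear); equivalence is about the return value only, since A mutates its argument in place while B does not.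
-- outside the precondition, e.g. on trim_pattern([], 0): A returns None, B returns []
import Mathlib
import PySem

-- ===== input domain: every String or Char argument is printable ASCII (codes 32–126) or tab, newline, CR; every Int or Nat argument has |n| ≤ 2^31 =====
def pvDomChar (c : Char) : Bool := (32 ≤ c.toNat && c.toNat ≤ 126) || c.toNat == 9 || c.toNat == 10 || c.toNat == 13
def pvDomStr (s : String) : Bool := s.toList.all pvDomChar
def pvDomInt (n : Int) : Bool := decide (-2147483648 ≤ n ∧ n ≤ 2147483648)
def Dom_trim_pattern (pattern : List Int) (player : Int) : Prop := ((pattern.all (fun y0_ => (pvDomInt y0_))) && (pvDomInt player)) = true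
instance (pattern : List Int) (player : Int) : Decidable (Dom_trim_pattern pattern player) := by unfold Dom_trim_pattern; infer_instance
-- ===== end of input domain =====

-- B trims with two index pointers over the unchanged list and returns one final
-- slice instead of A's repeated pops from both ends (return-value equivalence
-- only: A mutates its argument in place, B does not).


-- ===== PORT A =====
-- for i in range(0, length): fuel-counted loop; falling off the loop returns None.
-- pattern.pop(0) / pattern.pop(-1) run under a 'len >= 2' guard, where they are
-- exactly List.tail / List.dropLast.
def trim_pattern_loop (player : Int) : Nat → List Int → Option (List Int)
  | 0, _ => none
  | fuel + 1, pattern =>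
      -- done = True; first if: pop(0)
      let s1 : List Int × Bool :=
        if 2 ≤ pattern.length ∧ PySem.List.pyGet? pattern 1 ≠ some player
        then (pattern.tail, false) else (pattern, true)
      -- second if: pop(-1)
      let s2 : List Int × Bool :=
        if 2 ≤ s1.1.length ∧ PySem.List.pyGet? s1.1 (-2) ≠ some player
        then (s1.1.dropLast, false) else (s1.1, s1.2)
      if s2.2 then some s2.1 else trim_pattern_loop player fuel s2.1

def trim_pattern (pattern : List Int) (player : Int) : Option (List Int) :=
  trim_pattern_loop player pattern.length pattern

-- ===== PORT B =====
-- while True over two pointers lo, hi into the untouched list; final slice.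
def trim_pattern_alt_loop (pattern : List Int) (player : Int) (lo hi : Nat) : List Int :=
  let s1 : Nat × Bool :=
    if lo + 2 ≤ hi ∧ PySem.List.pyGet? pattern ((lo : Int) + 1) ≠ some player
    then (lo + 1, true) else (lo, false)
  let s2 : Nat × Bool :=
    if s1.1 + 2 ≤ hi ∧ PySem.List.pyGet? pattern ((hi : Int) - 2) ≠ some player
    then (hi - 1, true) else (hi, s1.2)
  if s2.2 then trim_pattern_alt_loop pattern player s1.1 s2.1
  else PySem.List.slice pattern (some (s1.1 : Int)) (some (s2.1 : Int))
termination_by hi - lo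
decreasing_by
  simp only [s2, s1] at *
  split_ifs at * <;> simp_all <;> omega

def trim_pattern_alt (pattern : List Int) (player : Int) : Option (List Int) :=
  some (trim_pattern_alt_loop pattern player 0 pattern.length)

-- ===== PRECONDITION & SPEC =====
-- Pre_ excludes only the empty list, on which A falls off its loop and returns
-- None (not a list); B returns the empty list there.
def Pre_trim_pattern (pattern : List Int) (player : Int) : Prop := pattern ≠ []
instance (pattern : List Int) (player : Int) : Decidable (Pre_trim_pattern pattern player) := by unfold Pre_trim_pattern; infer_instance
def pvWitness_trim_pattern : List Int × Int := ([1, 2, 1], 1)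
def Spec_trim_pattern (pattern : List Int) (player : Int) (out : Option (List Int)) : Prop := out = trim_pattern_alt pattern player
instance (pattern : List Int) (player : Int) (out : Option (List Int)) : Decidable (Spec_trim_pattern pattern player out) := by unfold Spec_trim_pattern; infer_instance

-- ===== CLAIM (what is proved, stated in full; the proofs are below) =====
def Claim_equal_trim_pattern : Prop := ∀ (pattern : List Int) (player : Int), Dom_trim_pattern pattern player → Pre_trim_pattern pattern player → Spec_trim_pattern pattern player (trim_pattern pattern player)

-- ===== LEMMAS AND PROOFS =====

theorem tail_take' (l : List Int) (n : Nat) : (l.take n).tail = l.tail.take (n - 1) := by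
  induction l <;> cases n <;> simp_all

theorem win_len (p : List Int) (lo hi : Nat) (h2 : hi ≤ p.length) :
    ((p.drop lo).take (hi - lo)).length = hi - lo := by
  simp only [List.length_take, List.length_drop]; omega

theorem win_get (p : List Int) (lo hi j : Nat) (hj : j < hi - lo) :
    ((p.drop lo).take (hi - lo))[j]? = p[lo + j]? := by
  simp [hj, List.getElem?_drop]

theorem win_tail (p : List Int) (lo hi : Nat) :
    ((p.drop lo).take (hi - lo)).tail = (p.drop (lo + 1)).take (hi - (lo + 1)) := by
  rw [tail_take']
  have h : (p.drop lo).tail = p.drop (lo + 1) := by simp [List.tail_drop]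
  rw [h]; congr 1

theorem win_dropLast (p : List Int) (lo hi : Nat) (h2 : hi ≤ p.length) :
    ((p.drop lo).take (hi - lo)).dropLast = (p.drop lo).take (hi - 1 - lo) := by
  rw [List.dropLast_eq_take, win_len p lo hi h2, List.take_take]
  congr 1; omega

theorem pyGet_one (xs : List Int) : PySem.List.pyGet? xs 1 = xs[1]? := by
  simpa using PySem.List.pyGet?_natCast xs 1

theorem pyGet_lo (p : List Int) (lo : Nat) :
    PySem.List.pyGet? p ((lo : Int) + 1) = p[lo + 1]? := by
  have h : (lo : Int) + 1 = ((lo + 1 : Nat) : Int) := by omega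
  rw [h, PySem.List.pyGet?_natCast]

theorem pyGet_hi (p : List Int) (hi : Nat) (h : 2 ≤ hi) :
    PySem.List.pyGet? p ((hi : Int) - 2) = p[hi - 2]? := by
  have h2 : (hi : Int) - 2 = ((hi - 2 : Nat) : Int) := by omega
  rw [h2, PySem.List.pyGet?_natCast]

-- A's first-if condition on the window equals B's first-if condition on the indices
theorem cond1_eq (p : List Int) (player : Int) (lo hi : Nat) (h2 : hi ≤ p.length) :
    (2 ≤ ((p.drop lo).take (hi - lo)).length ∧
        PySem.List.pyGet? ((p.drop lo).take (hi - lo)) 1 ≠ some player) =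
      (lo + 2 ≤ hi ∧ PySem.List.pyGet? p ((lo : Int) + 1) ≠ some player) := by
  apply propext
  rw [win_len p lo hi h2, pyGet_one, pyGet_lo]
  constructor
  · rintro ⟨ha, hb⟩
    exact ⟨by omega, by rwa [win_get p lo hi 1 (by omega)] at hb⟩
  · rintro ⟨ha, hb⟩
    exact ⟨by omega, by rwa [win_get p lo hi 1 (by omega)]⟩

-- A's second-if condition on a window equals B's second-if condition
theorem cond2_eq (p : List Int) (player : Int) (lo hi : Nat) (h2 : hi ≤ p.length) :
    (2 ≤ ((p.drop lo).take (hi - lo)).length ∧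
        PySem.List.pyGet? ((p.drop lo).take (hi - lo)) (-2) ≠ some player) =
      (lo + 2 ≤ hi ∧ PySem.List.pyGet? p ((hi : Int) - 2) ≠ some player) := by
  apply propext
  by_cases hw : lo + 2 ≤ hi
  · have hlen : 2 ≤ ((p.drop lo).take (hi - lo)).length := by rw [win_len p lo hi h2]; omega
    rw [PySem.List.pyGet?_neg_ofNat _ 2 (by omega) hlen, win_len p lo hi h2,
      win_get p lo hi (hi - lo - 2) (by omega), pyGet_hi p hi (by omega)]
    have h3 : lo + (hi - lo - 2) = hi - 2 := by omega
    rw [h3]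
    constructor
    · rintro ⟨_, hb⟩; exact ⟨hw, hb⟩
    · rintro ⟨_, hb⟩; exact ⟨by omega, hb⟩
  · rw [win_len p lo hi h2]
    constructor
    · rintro ⟨ha, _⟩; omega
    · rintro ⟨ha, _⟩; omega

theorem trim_loop_eq_alt (pattern : List Int) (player : Int) :
    ∀ (fuel lo hi : Nat), lo < hi → hi ≤ pattern.length → hi - lo ≤ fuel →
      trim_pattern_loop player fuel ((pattern.drop lo).take (hi - lo)) =
        some (trim_pattern_alt_loop pattern player lo hi) := by
  intro fuel
  induction fuel with
  | zero => intro lo hi h1 h2 h3; omega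
  | succ fuel ih =>
    intro lo hi h1 h2 h3
    rw [trim_pattern_alt_loop]
    simp only [trim_pattern_loop]
    simp only [cond1_eq pattern player lo hi h2]
    by_cases c1 : lo + 2 ≤ hi ∧ PySem.List.pyGet? pattern ((lo : Int) + 1) ≠ some player
    · rw [if_pos c1, if_pos c1]
      dsimp only
      rw [win_tail pattern lo hi]
      simp only [cond2_eq pattern player (lo + 1) hi h2]
      by_cases c2 : lo + 1 + 2 ≤ hi ∧ PySem.List.pyGet? pattern ((hi : Int) - 2) ≠ some player
      · rw [if_pos c2, if_pos c2]
        dsimp only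
        rw [win_dropLast pattern (lo + 1) hi h2]
        exact ih (lo + 1) (hi - 1) (by omega) (by omega) (by omega)
      · rw [if_neg c2, if_neg c2]
        dsimp only
        exact ih (lo + 1) hi (by omega) h2 (by omega)
    · rw [if_neg c1, if_neg c1]
      dsimp only
      simp only [cond2_eq pattern player lo hi h2]
      by_cases c2 : lo + 2 ≤ hi ∧ PySem.List.pyGet? pattern ((hi : Int) - 2) ≠ some player
      · rw [if_pos c2, if_pos c2]
        dsimp only
        rw [win_dropLast pattern lo hi h2]
        exact ih lo (hi - 1) (by omega) (by omega) (by omega)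
      · rw [if_neg c2, if_neg c2]
        dsimp only
        rw [PySem.List.slice_natCast]
        simp

-- ===== VERDICT (by name: the statement is the Claim_ definition above) =====
theorem trim_pattern_spec : Claim_equal_trim_pattern := by
  intro pattern player _ hpre
  unfold Spec_trim_pattern trim_pattern trim_pattern_alt
  have h := trim_loop_eq_alt pattern player pattern.length 0 pattern.length
    (by cases pattern <;> simp_all [Pre_trim_pattern]) le_rfl (by omega)
  simpa using h
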